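-- pv_equiv track=rewrite | github.com/matheus-frota/CubeLife | algoritmo_genetico.py | eletismo
-- ===== SOURCE A (Python) =====
-- divisivelPorDois = lambda x : x if x%2 == 0 else x+1
--
-- def quantidadeDeJogadoreSelecionados(NUM_JOGADORES):
--     if NUM_JOGADORES%2 == 0:
--         return divisivelPorDois(int(NUM_JOGADORES/2))
--     elif NUM_JOGADORES%2 != 0:
--         return divisivelPorDois(int(round(NUM_JOGADORES/2,0)))
--
-- def ordenarValoresDicionario(dicionario):
--     # Variavel auxiliar
--     armazenarResultadoOrdenado = []
--     for i in sorted(dicionario, key = dicionario.get, reverse = True):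
--         armazenarResultadoOrdenado.append((i,dicionario[i]))
--     return armazenarResultadoOrdenado
--
-- filtrarDicionarioComApenasJogadoresSelecionados = lambda x, y: dict([ (i,x[i]) for i in x if i in set(y)])
--
-- nomeJogador = lambda x : [i[0] for i in x]
--
-- def eletismo(movimentoJogadores, NUM_JOGADORES):
--     # Variáveis auxiliares
--     informacaoDeJogadorETempo = {}
--     jogadoreSelecionados = []
--     # Identificando quantidade de jogadores que serão selecionados
--     quantidadeJogadores = quantidadeDeJogadoreSelecionados(NUM_JOGADORES)
--     # Reorganizando informações do dicionario, em um dicionario menor com apenas a informação do tempo de vida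
--     for id in movimentoJogadores.keys():
--         informacaoDeJogadorETempo[id] = movimentoJogadores[id][-1]
--     jogadoresOrdenados = ordenarValoresDicionario(informacaoDeJogadorETempo)
--     return jogadoresOrdenados[0],filtrarDicionarioComApenasJogadoresSelecionados(movimentoJogadores,nomeJogador(jogadoresOrdenados[:quantidadeJogadores]))
-- ===== SOURCE B (Python) =====
-- def eletismo(movimentoJogadores, NUM_JOGADORES):
--     # selection by value threshold + tie budget instead of sorting the players
--     metade = NUM_JOGADORES // 2
--     k = metade + metade % 2
--     ultimos = [(i, v, v[-1]) for i, v in movimentoJogadores.items()]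
--     melhor = max(((i, u) for i, _, u in ultimos), key=lambda p: p[1])
--     if k <= 0:
--         return melhor, {}
--     if k >= len(ultimos):
--         return melhor, dict(movimentoJogadores)
--     valores = sorted((u for _, _, u in ultimos), reverse=True)
--     corte = valores[k - 1]
--     sobra = k - sum(1 for _, _, u in ultimos if u > corte)
--     selecionados = {}
--     for i, v, u in ultimos:
--         if u > corte:
--             selecionados[i] = v
--         elif u == corte and sobra > 0:
--             selecionados[i] = v
--             sobra -= 1
--     return melhor, selecionados
-- ===== Notes on version B (the rewrite author's own statement) =====
-- stated objective: faster
-- what changed: A builds an auxiliary dict, stable-sorts all players by lifetime, slices the top k and filters the dict with a membership test that rebuilds set(y) for every key (quadratic); B sorts only the lifetime values to get the k-th value as a cut-off, takes the best via max, and selects in one pass over the dict: everything above the cut-off plus the first ties within a budget.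
-- outside the precondition, e.g. on eletismo({1: [5], 2: [3], 3: [1]}, -3): A returns ((1, 5), {1: [5]}), B returns ((1, 5), {})
import Mathlib
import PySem

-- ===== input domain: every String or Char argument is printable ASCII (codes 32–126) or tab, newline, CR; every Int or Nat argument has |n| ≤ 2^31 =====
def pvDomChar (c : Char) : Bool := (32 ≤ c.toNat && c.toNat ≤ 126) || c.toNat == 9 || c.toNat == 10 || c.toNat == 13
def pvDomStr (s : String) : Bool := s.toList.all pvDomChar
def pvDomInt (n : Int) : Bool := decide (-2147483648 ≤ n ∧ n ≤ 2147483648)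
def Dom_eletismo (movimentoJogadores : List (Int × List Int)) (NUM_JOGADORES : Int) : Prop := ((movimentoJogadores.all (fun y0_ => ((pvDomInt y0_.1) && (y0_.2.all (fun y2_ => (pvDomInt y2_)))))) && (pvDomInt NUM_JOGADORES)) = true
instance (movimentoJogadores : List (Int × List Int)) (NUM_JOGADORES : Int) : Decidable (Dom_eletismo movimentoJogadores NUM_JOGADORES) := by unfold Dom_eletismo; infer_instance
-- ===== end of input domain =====

-- B replaces A's full stable sort of the players, slice and per-key set rebuild (A re-evaluates
-- set(y) for every key, a quadratic filter) by sorting only the lifetime values to obtain the k-th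
-- value as a cut-off and then selecting in one pass: everything above the cut-off plus the first
-- ties within a budget (objective: faster).

-- ===== PORT A =====
def divisivelPorDois (x : Int) : Int :=
  if PySem.Int.mod x 2 == 0 then x else x + 1

-- hand-ported float step, exact on |N| ≤ 2^31: for odd N, N/2 is the exact half-integer m + 0.5
-- (m = N//2), and Python's round-half-to-even of m + 0.5 is m + m % 2
def arredondarMeio (N : Int) : Int :=
  PySem.Int.floordiv N 2 + PySem.Int.mod (PySem.Int.floordiv N 2) 2

def quantidadeDeJogadoreSelecionados (N : Int) : Int :=
  if PySem.Int.mod N 2 == 0 then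
    divisivelPorDois (PySem.Int.floordiv N 2)  -- int(N/2): exact, N is even
  else
    divisivelPorDois (arredondarMeio N)

def ordenarValoresDicionario (dicionario : PySem.Dict Int Int) : List (Int × Int) :=
  (PySem.List.sorted dicionario.keys (fun i => dicionario.getD i 0) true).foldl
    (fun acc i => acc ++ [(i, dicionario.getD i 0)]) []

def eletismo (movimentoJogadores : List (Int × List Int)) (NUM_JOGADORES : Int) :
    (Int × Int) × (List (Int × List Int)) :=
  let movD : PySem.Dict Int (List Int) := PySem.Dict.mk movimentoJogadores
  let quantidadeJogadores := quantidadeDeJogadoreSelecionados NUM_JOGADORES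
  -- movimentoJogadores[id][-1]; the [-1] default is unreachable under Pre_ (no empty move list)
  let informacao := movD.keys.foldl
    (fun d id => d.insert id (PySem.List.pyGetD (movD.getD id []) (-1) 0)) PySem.Dict.empty
  let jogadoresOrdenados := ordenarValoresDicionario informacao
  let nomes := (PySem.List.slice jogadoresOrdenados none (some quantidadeJogadores)).map (fun i => i.1)
  -- jogadoresOrdenados[0]: the default is unreachable under Pre_ (nonempty dict)
  (PySem.List.pyGetD jogadoresOrdenados 0 (0, 0),
   (PySem.Dict.ofList ((movD.keys.filter
       (fun i => PySem.Set.contains (PySem.Set.ofList nomes) i)).map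
       (fun i => (i, movD.getD i [])))).items)

-- ===== PORT B =====
def eletismo_alt (movimentoJogadores : List (Int × List Int)) (NUM_JOGADORES : Int) :
    (Int × Int) × (List (Int × List Int)) :=
  let metade := PySem.Int.floordiv NUM_JOGADORES 2
  let k := metade + PySem.Int.mod metade 2
  let ultimos := movimentoJogadores.map (fun p => (p.1, p.2, PySem.List.pyGetD p.2 (-1) 0))
  let melhor := PySem.List.maxD (ultimos.map (fun t => (t.1, t.2.2))) (fun p => p.2) (0, 0)
  if k ≤ 0 then (melhor, [])
  else if (ultimos.length : Int) ≤ k then (melhor, movimentoJogadores)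
  else
    let valores := PySem.List.sorted (ultimos.map (fun t => t.2.2)) (fun v => v) true
    let corte := PySem.List.pyGetD valores (k - 1) 0
    let sobra := k - ((ultimos.filter (fun t => corte < t.2.2)).length : Int)
    (melhor, (ultimos.foldl (fun s t =>
        if corte < t.2.2 then (s.1 ++ [(t.1, t.2.1)], s.2)
        else if t.2.2 == corte && decide (0 < s.2) then (s.1 ++ [(t.1, t.2.1)], s.2 - 1)
        else s) (([] : List (Int × List Int)), sobra)).1)

-- ===== PRECONDITION & SPEC =====
-- Pre_ excludes: an empty dict and empty move lists (A raises IndexError there); duplicate player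
-- ids (impossible for the Python dict input); and negative NUM_JOGADORES, which is outside the
-- task's natural domain (a player count) — there A slices with a negative bound.
def Pre_eletismo (movimentoJogadores : List (Int × List Int)) (NUM_JOGADORES : Int) : Prop :=
  movimentoJogadores ≠ [] ∧ (∀ p ∈ movimentoJogadores, p.2 ≠ []) ∧
    (movimentoJogadores.map (fun p => p.1)).Nodup ∧ 0 ≤ NUM_JOGADORES
instance (movimentoJogadores : List (Int × List Int)) (NUM_JOGADORES : Int) :
    Decidable (Pre_eletismo movimentoJogadores NUM_JOGADORES) := by
  unfold Pre_eletismo; infer_instance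

def pvWitness_eletismo : (List (Int × List Int)) × Int := ([(1, [5, 2]), (2, [9]), (3, [7])], 3)

def Spec_eletismo (movimentoJogadores : List (Int × List Int)) (NUM_JOGADORES : Int)
    (out : (Int × Int) × (List (Int × List Int))) : Prop :=
  out = eletismo_alt movimentoJogadores NUM_JOGADORES
instance (movimentoJogadores : List (Int × List Int)) (NUM_JOGADORES : Int)
    (out : (Int × Int) × (List (Int × List Int))) :
    Decidable (Spec_eletismo movimentoJogadores NUM_JOGADORES out) := by
  unfold Spec_eletismo; infer_instance

-- ===== CLAIM (what is proved, stated in full; the proofs are below) =====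
def Claim_equal_eletismo : Prop := ∀ (movimentoJogadores : List (Int × List Int)) (NUM_JOGADORES : Int), Dom_eletismo movimentoJogadores NUM_JOGADORES → Pre_eletismo movimentoJogadores NUM_JOGADORES → Spec_eletismo movimentoJogadores NUM_JOGADORES (eletismo movimentoJogadores NUM_JOGADORES)

-- ===== LEMMAS AND PROOFS =====

-- v[-1], the lifetime a player is ranked by
def wlK (p : Int × List Int) : Int := PySem.List.pyGetD p.2 (-1) 0

-- A's selection count equals B's closed form m + m % 2 (m = N // 2), for every N
theorem quantidade_eq (N : Int) :
    quantidadeDeJogadoreSelecionados N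
      = PySem.Int.floordiv N 2 + PySem.Int.mod (PySem.Int.floordiv N 2) 2 := by
  unfold quantidadeDeJogadoreSelecionados divisivelPorDois arredondarMeio
  rw [PySem.Int.floordiv_eq_ediv_of_pos (by norm_num), PySem.Int.mod_eq_emod_of_pos (a := N) (by norm_num)]
  rw [PySem.Int.mod_eq_emod_of_pos (a := N / 2) (by norm_num),
      PySem.Int.mod_eq_emod_of_pos (a := N / 2 + N / 2 % 2) (by norm_num)]
  simp only [beq_iff_eq]
  split_ifs <;> omega

-- inserting into a descending list preserves any ordering S compatible with the keys
theorem insertBy_stable {α : Type} (key : α → Int) (S : α → α → Prop) (x : α) :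
    ∀ (acc : List α), acc.Pairwise S →
    (∀ a b, S a b → key b ≤ key a) →
    (∀ a ∈ acc, key x ≤ key a → S a x) →
    (∀ a ∈ acc, key a < key x → S x a) →
    (PySem.List.insertBy (fun a b => decide (key b < key a)) x acc).Pairwise S := by
  intro acc
  induction acc with
  | nil => intro _ _ _ _; simp [PySem.List.insertBy]
  | cons y ys ih =>
    intro hp hS hx hx2
    rw [List.pairwise_cons] at hp
    obtain ⟨hy, hys⟩ := hp
    simp only [PySem.List.insertBy.eq_2]
    by_cases h : key y < key x
    · simp only [decide_eq_true_eq, h, if_pos]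
      -- x :: y :: ys
      refine List.Pairwise.cons ?_ (List.Pairwise.cons hy hys)
      intro z hz
      rcases List.mem_cons.mp hz with rfl | hz'
      · exact hx2 _ List.mem_cons_self h
      · have : key z ≤ key y := hS y z (hy z hz')
        exact hx2 z (List.mem_cons_of_mem _ hz') (lt_of_le_of_lt this h)
    · simp only [decide_eq_true_eq, h, if_neg, not_false_iff]
      refine List.Pairwise.cons ?_ ?_
      · intro z hz
        rw [PySem.List.mem_insertBy] at hz
        rcases hz with rfl | hz'
        · exact hx y List.mem_cons_self (le_of_not_gt h)
        · exact hy z hz'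
      · exact ih hys hS (fun a ha hka => hx a (List.mem_cons_of_mem _ ha) hka)
          (fun a ha hka => hx2 a (List.mem_cons_of_mem _ ha) hka)

-- stability of Python's reverse sort: equal keys keep their original relative order
theorem sorted_rev_stable {α : Type} [BEq α] [LawfulBEq α] (key : α → Int) :
    ∀ (l : List α), l.Nodup →
    (PySem.List.sorted l key true).Pairwise
      (fun a b => key b < key a ∨ (key a = key b ∧ l.idxOf a < l.idxOf b)) := by
  intro l
  induction l using List.reverseRecOn with
  | nil => intro _; rw [PySem.List.sorted_rev_eq_foldl_insertBy]; exact List.Pairwise.nil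
  | append_singleton l x ih =>
    intro hnd
    have hndl : l.Nodup := (List.nodup_append.mp hnd).1
    have hxl : x ∉ l := by
      intro hx
      have hd := (List.nodup_append.mp hnd).2.2
      exact hd x hx x (by simp) rfl
    rw [PySem.List.sorted_rev_eq_foldl_insertBy, List.foldl_append, List.foldl_cons, List.foldl_nil]
    have hmem : ∀ a ∈ (List.foldl (fun acc x =>
        PySem.List.insertBy (fun a b => decide (key b < key a)) x acc) ([] : List α) l), a ∈ l := by
      intro a ha
      have hperm := PySem.List.foldl_insertBy_perm
        (fun a b => decide (key b < key a)) l ([] : List α)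
      exact (hperm.mem_iff).mp ha
    have hidx : ∀ a ∈ l, (l ++ [x]).idxOf a = l.idxOf a := by
      intro a ha
      rw [List.idxOf_append, if_pos ha]
    have hidxx : (l ++ [x]).idxOf x = l.length := by
      rw [List.idxOf_append, if_neg hxl]
      simp
    have ihp := ih hndl
    rw [PySem.List.sorted_rev_eq_foldl_insertBy] at ihp
    apply insertBy_stable key _ x _
    · -- lift pairwise from l to l ++ [x]
      refine ihp.imp_of_mem ?_
      intro a b ha hb hab
      rcases hab with h | ⟨he, hi⟩
      · exact Or.inl h
      · exact Or.inr ⟨he, by rw [hidx a (hmem a ha), hidx b (hmem b hb)]; exact hi⟩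
    · intro a b hab
      rcases hab with h | ⟨he, _⟩
      · exact le_of_lt h
      · exact le_of_eq he.symm
    · intro a ha hka
      rcases lt_or_eq_of_le hka with h | h
      · exact Or.inl h
      · refine Or.inr ⟨h.symm, ?_⟩
        rw [hidx a (hmem a ha), hidxx]
        exact List.idxOf_lt_length_iff.mpr (hmem a ha)
    · intro a ha hka
      exact Or.inl hka

-- membership in the first k of a strictly ordered list, by counting predecessors
theorem take_countP_mem {α : Type} (r : α → α → Bool)
    (hasym : ∀ a b, r a b = true → r b a = false) :
    ∀ (s : List α) (k : Nat) (x : α), s.Pairwise (fun a b => r a b = true) → x ∈ s →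
      (x ∈ s.take k ↔ s.countP (fun y => r y x) < k) := by
  intro s
  induction s with
  | nil => intro k x _ hx; simp at hx
  | cons a s' ih =>
    intro k x hp hx
    rw [List.pairwise_cons] at hp
    obtain ⟨ha, hp'⟩ := hp
    by_cases hxa : x = a
    · subst hxa
      have hra : r x x = false := by
        cases h : r x x
        · rfl
        · exact absurd (hasym x x h) (by simp [h])
      have hc : s'.countP (fun y => r y x) = 0 := by
        rw [List.countP_eq_zero]
        intro b hb
        simp [hasym x b (ha b hb)]
      rw [List.countP_cons]
      simp only [hra, hc]
      cases k with
      | zero => simp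
      | succ k' => simp [List.take_succ_cons]
    · have hx' : x ∈ s' := by
        rcases List.mem_cons.mp hx with h | h
        · exact absurd h hxa
        · exact h
      have hrax : r a x = true := ha x hx'
      rw [List.countP_cons]
      simp only [hrax, if_pos]
      cases k with
      | zero => simp
      | succ k' =>
        rw [List.take_succ_cons]
        constructor
        · intro hmem
          rcases List.mem_cons.mp hmem with h | h
          · exact absurd h hxa
          · have := (ih k' x hp' hx').mp h
            omega
        · intro hlt
          have := (ih k' x hp' hx').mpr (by omega)
          exact List.mem_cons_of_mem _ this

theorem insertBy_map {α β : Type} (f : α → β) (key : β → Int) (x : α) :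
    ∀ (acc : List α),
      PySem.List.insertBy (fun a b => decide (key b < key a)) (f x) (acc.map f)
        = (PySem.List.insertBy (fun a b => decide (key (f b) < key (f a))) x acc).map f := by
  intro acc
  induction acc with
  | nil => simp [PySem.List.insertBy]
  | cons y ys ih =>
    simp only [List.map_cons, PySem.List.insertBy.eq_2]
    split_ifs with h
    · simp
    · simp [ih]

-- sorting a mapped list is mapping the list sorted by the composed key
theorem sorted_rev_map {α β : Type} (f : α → β) (key : β → Int) (l : List α) :
    PySem.List.sorted (l.map f) key true
      = (PySem.List.sorted l (fun a => key (f a)) true).map f := by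
  rw [PySem.List.sorted_rev_eq_foldl_insertBy, PySem.List.sorted_rev_eq_foldl_insertBy]
  suffices h : ∀ (acc : List α),
      List.foldl (fun acc x => PySem.List.insertBy (fun a b => decide (key b < key a)) x acc)
        (acc.map f) (l.map f)
      = (List.foldl (fun acc x =>
          PySem.List.insertBy (fun a b => decide (key (f b) < key (f a))) x acc) acc l).map f by
    exact h []
  induction l with
  | nil => intro acc; simp
  | cons x xs ih =>
    intro acc
    simp only [List.map_cons, List.foldl_cons]
    rw [insertBy_map f key x acc]
    exact ih _

theorem insertBy_congr {α : Type} (key₁ key₂ : α → Int) (x : α) :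
    ∀ (acc : List α), key₁ x = key₂ x → (∀ y ∈ acc, key₁ y = key₂ y) →
      PySem.List.insertBy (fun a b => decide (key₁ b < key₁ a)) x acc
        = PySem.List.insertBy (fun a b => decide (key₂ b < key₂ a)) x acc := by
  intro acc
  induction acc with
  | nil => intro _ _; rfl
  | cons y ys ih =>
    intro hx hy
    have h1 : key₁ y = key₂ y := hy y List.mem_cons_self
    simp only [PySem.List.insertBy.eq_2, hx, h1]
    split_ifs with h
    · rfl
    · rw [ih hx (fun z hz => hy z (List.mem_cons_of_mem _ hz))]

-- the sort only looks at key values on members of the list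
theorem sorted_rev_congr_key {α : Type} (key₁ key₂ : α → Int) (l : List α)
    (h : ∀ x ∈ l, key₁ x = key₂ x) :
    PySem.List.sorted l key₁ true = PySem.List.sorted l key₂ true := by
  rw [PySem.List.sorted_rev_eq_foldl_insertBy, PySem.List.sorted_rev_eq_foldl_insertBy]
  suffices hh : ∀ (rest acc : List α), (∀ x ∈ rest, key₁ x = key₂ x) →
      (∀ y ∈ acc, key₁ y = key₂ y) →
      List.foldl (fun acc x => PySem.List.insertBy (fun a b => decide (key₁ b < key₁ a)) x acc) acc rest
      = List.foldl (fun acc x => PySem.List.insertBy (fun a b => decide (key₂ b < key₂ a)) x acc) acc rest by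
    exact hh l [] h (by simp)
  intro rest
  induction rest with
  | nil => intro acc _ _; rfl
  | cons x xs ih =>
    intro acc hr hacc
    simp only [List.foldl_cons]
    have hx : key₁ x = key₂ x := hr x List.mem_cons_self
    rw [insertBy_congr key₁ key₂ x acc hx hacc]
    apply ih _ (fun z hz => hr z (List.mem_cons_of_mem _ hz))
    intro y hy
    rw [PySem.List.mem_insertBy] at hy
    rcases hy with rfl | hy
    · exact hx
    · exact hacc y hy

-- Python's max (first maximal element) is the head of the stable reverse sort
theorem max?_eq_head?_sorted_rev {α : Type} (key : α → Int) (l : List α) :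
    PySem.List.max? l key = (PySem.List.sorted l key true).head? := by
  rw [PySem.List.sorted_rev_eq_foldl_insertBy]
  show List.foldl _ none l = _
  suffices h : ∀ (rest acc : List α),
      List.foldl (fun acc x => match acc with
        | none => some x
        | some m => if key m < key x then some x else some m) acc.head? rest
      = (List.foldl (fun acc x =>
          PySem.List.insertBy (fun a b => decide (key b < key a)) x acc) acc rest).head? by
    have := h l []
    simpa [PySem.List.max?] using this
  intro rest
  induction rest with
  | nil => intro acc; rfl
  | cons x xs ih =>
    intro acc
    simp only [List.foldl_cons]
    have hstep : (match acc.head? with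
        | none => some x
        | some m => if key m < key x then some x else some m)
        = (PySem.List.insertBy (fun a b => decide (key b < key a)) x acc).head? := by
      cases acc with
      | nil => simp [PySem.List.insertBy]
      | cons m rest' =>
        simp only [List.head?_cons, PySem.List.insertBy.eq_2]
        by_cases h : key m < key x <;> simp [h]
    rw [hstep]
    exact ih _

theorem countP_or_disjoint {α : Type} (a b : α → Bool) :
    ∀ (l : List α), (∀ x ∈ l, ¬(a x = true ∧ b x = true)) →
      l.countP (fun x => a x || b x) = l.countP a + l.countP b := by
  intro l
  induction l with
  | nil => intro _; simp
  | cons x xs ih =>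
    intro h
    simp only [List.countP_cons]
    rw [ih (fun y hy => h y (List.mem_cons_of_mem _ hy))]
    have := h x (List.mem_cons_self)
    cases ha : a x <;> cases hb : b x <;> simp_all <;> omega

-- a dict built from pairs with distinct keys has exactly those pairs as items
theorem items_ofList_of_nodup {κ ν : Type} [BEq κ] [LawfulBEq κ] (ps : List (κ × ν))
    (h : (ps.map Prod.fst).Nodup) : (PySem.Dict.ofList ps).items = ps := by
  show (PySem.Dict.update PySem.Dict.empty ps).items = ps
  rw [PySem.Dict.update]
  rw [PySem.Dict.items_foldl_insert_fresh (l := ps) (k := fun p => p.1) (v := fun p => p.2)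
    (d := (PySem.Dict.empty : PySem.Dict κ ν)) (fun a _ => PySem.Dict.contains_empty a.1) h]
  show ([] : List (κ × ν)) ++ _ = _
  simp

-- B's budget pass selects exactly the elements of any selection predicate that takes all
-- values above the cut-off, no values below it, and the first b0 ties in list order
theorem budget_aux {α : Type} (w : α → Int) (t : Int) (b0 : Nat) (sel : α → Bool) (L : List α)
    (H1 : ∀ p ∈ L, t < w p → sel p = true)
    (H2 : ∀ p ∈ L, w p < t → sel p = false)
    (H3 : ∀ pre p suf, L = pre ++ p :: suf → w p = t →
      (sel p = true ↔ pre.countP (fun q => w q == t) < b0)) :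
    ∀ (rest done accL : List α) (b : Int),
      L = done ++ rest →
      b = (b0 : Int) - min ((done.countP (fun q => w q == t) : Int)) (b0 : Int) →
      (rest.foldl (fun s x => if t < w x then (s.1 ++ [x], s.2)
          else if w x == t && decide (0 < s.2) then (s.1 ++ [x], s.2 - 1)
          else s) (accL, b)).1
        = accL ++ rest.filter sel := by
  intro rest
  induction rest with
  | nil => intro done accL b _ _; simp
  | cons x rest' ih =>
    intro done accL b hL hb
    have hxL : x ∈ L := by rw [hL]; simp
    simp only [List.foldl_cons]
    rcases lt_trichotomy t (w x) with hgt | heq | hlt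
    · -- above the cut-off: selected
      rw [if_pos hgt]
      have hsel : sel x = true := H1 x hxL hgt
      have hcount : (done ++ [x]).countP (fun q => w q == t)
          = done.countP (fun q => w q == t) := by
        rw [List.countP_append, List.countP_cons]
        have : (w x == t) = false := by simp; omega
        simp [this]
      rw [ih (done ++ [x]) (accL ++ [x]) b (by rw [hL]; simp) (by rw [hcount]; exact hb)]
      simp [hsel]
    · -- a tie
      rw [if_neg (by omega)]
      have hwt : (w x == t) = true := by simp [heq]
      have hdec := H3 done x rest' hL heq.symm
      by_cases hpos : 0 < b
      · have hsel : sel x = true := by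
          apply hdec.mpr
          omega
        rw [if_pos (by simp [hwt, hpos])]
        have hcount : (done ++ [x]).countP (fun q => w q == t)
            = done.countP (fun q => w q == t) + 1 := by
          rw [List.countP_append, List.countP_cons]
          simp [hwt]
        rw [ih (done ++ [x]) (accL ++ [x]) (b - 1) (by rw [hL]; simp)
          (by rw [hcount]; push_cast; omega)]
        simp [hsel]
      · have hsel : sel x = false := by
          have := hdec
          cases h : sel x
          · rfl
          · exfalso; have := this.mp h; omega
        rw [if_neg (by simp [hwt]; omega)]
        have hcount : (done ++ [x]).countP (fun q => w q == t)
            = done.countP (fun q => w q == t) + 1 := by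
          rw [List.countP_append, List.countP_cons]
          simp [hwt]
        rw [ih (done ++ [x]) accL b (by rw [hL]; simp) (by rw [hcount]; push_cast; omega)]
        simp [hsel]
    · -- below the cut-off: never selected
      have hwt : (w x == t) = false := by simp; omega
      rw [if_neg (by omega), if_neg (by simp [hwt])]
      have hsel : sel x = false := H2 x hxL hlt
      have hcount : (done ++ [x]).countP (fun q => w q == t)
          = done.countP (fun q => w q == t) := by
        rw [List.countP_append, List.countP_cons]
        simp [hwt]
      rw [ih (done ++ [x]) accL b (by rw [hL]; simp) (by rw [hcount]; exact hb)]
      simp [hsel]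


theorem countP_idx_prefix {α : Type} [BEq α] [LawfulBEq α] (w : α → Int) (t : Int)
    (pre suf : List α) (p : α) (hnd : (pre ++ p :: suf).Nodup) :
    (pre ++ p :: suf).countP (fun y => decide (w y = t)
        && decide ((pre ++ p :: suf).idxOf y < (pre ++ p :: suf).idxOf p))
      = pre.countP (fun q => w q == t) := by
  obtain ⟨hndpre, hndrest, hdisj⟩ := List.nodup_append.mp hnd
  have hppre : p ∉ pre := by
    intro hp
    exact hdisj p hp p (List.mem_cons_self) rfl
  have hpsuf : p ∉ suf := (List.nodup_cons.mp hndrest).1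
  have hidxp : (pre ++ p :: suf).idxOf p = pre.length := by
    rw [List.idxOf_append, if_neg hppre, List.idxOf_cons_self]
    omega
  rw [hidxp, List.countP_append, List.countP_cons]
  have h1 : pre.countP (fun y => decide (w y = t)
      && decide ((pre ++ p :: suf).idxOf y < pre.length)) = pre.countP (fun q => w q == t) := by
    apply List.countP_congr
    intro q hq
    have : (pre ++ p :: suf).idxOf q < pre.length := by
      rw [List.idxOf_append, if_pos hq]
      exact List.idxOf_lt_length_iff.mpr hq
    simp [this]
  have h2 : (suf.countP (fun y => decide (w y = t)
      && decide ((pre ++ p :: suf).idxOf y < pre.length))) = 0 := by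
    rw [List.countP_eq_zero]
    intro q hq
    have hqpre : q ∉ pre := by
      intro hqp
      exact hdisj q hqp q (List.mem_cons_of_mem _ hq) rfl
    have hqp : q ≠ p := by
      intro h
      exact hpsuf (h ▸ hq)
    have : ¬ ((pre ++ p :: suf).idxOf q < pre.length) := by
      rw [List.idxOf_append, if_neg hqpre, List.idxOf_cons_ne _ (fun h => hqp h.symm)]
      omega
    simp [this]
  rw [h1, h2]
  rw [hidxp]
  simp

-- A, with a Nodup-key input, in terms of the stable reverse sort of the pairs themselves
theorem eletismo_normal (l : List (Int × List Int)) (N : Int)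
    (hnd : (l.map (fun p => p.1)).Nodup) :
    eletismo l N =
      (PySem.List.pyGetD ((PySem.List.sorted l wlK true).map (fun p => (p.1, wlK p))) 0 (0, 0),
       (PySem.Dict.ofList (l.filter (fun p =>
         PySem.Set.contains (PySem.Set.ofList ((PySem.List.slice
           ((PySem.List.sorted l wlK true).map (fun p => (p.1, wlK p))) none
           (some (quantidadeDeJogadoreSelecionados N))).map (fun i => i.1))) p.1))).items) := by
  have hget : ∀ p ∈ l, (PySem.Dict.mk l).getD p.1 [] = p.2 := by
    intro p hp
    exact PySem.Dict.getD_of_mem_items (PySem.Dict.mk l) (by simpa using hp)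
      (by simpa [PySem.Dict.keys_mk] using hnd) []
  have hinfo : (l.map (fun p => p.1)).foldl
      (fun d id => d.insert id (PySem.List.pyGetD ((PySem.Dict.mk l).getD id []) (-1) 0))
      PySem.Dict.empty
      = PySem.Dict.mk (l.map (fun p => (p.1, wlK p))) := by
    apply PySem.Dict.ext
    rw [PySem.Dict.items_foldl_insert_fresh (l := l.map (fun p => p.1)) (k := fun id => id)
      (v := fun id => PySem.List.pyGetD ((PySem.Dict.mk l).getD id []) (-1) 0)
      (d := PySem.Dict.empty) (fun a _ => PySem.Dict.contains_empty a)
      (by simpa using hnd)]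
    show [] ++ _ = _
    rw [List.nil_append, List.map_map]
    show _ = List.map (fun p => (p.1, wlK p)) l
    apply List.map_congr_left
    intro p hp
    simp [hget p hp, wlK]
  have hgetD_pairs : ∀ p ∈ l,
      (PySem.Dict.mk (l.map (fun p => (p.1, wlK p)))).getD p.1 0 = wlK p := by
    intro p hp
    have hkn : ((PySem.Dict.mk (l.map (fun p => (p.1, wlK p)))).keys).Nodup := by
      rw [PySem.Dict.keys_mk, List.map_map]
      exact hnd
    exact PySem.Dict.getD_of_mem_items (PySem.Dict.mk (l.map (fun p => (p.1, wlK p))))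
      (k := p.1) (v := wlK p) (List.mem_map.mpr ⟨p, hp, rfl⟩) hkn 0
  have hsort : PySem.List.sorted ((PySem.Dict.mk (l.map (fun p => (p.1, wlK p)))).keys)
      (fun i => (PySem.Dict.mk (l.map (fun p => (p.1, wlK p)))).getD i 0) true
      = (PySem.List.sorted l wlK true).map (fun p => p.1) := by
    rw [PySem.Dict.keys_mk, List.map_map]
    show PySem.List.sorted (l.map (fun p => p.1)) _ true = _
    rw [sorted_rev_map (fun p => p.1)
      (fun i => (PySem.Dict.mk (l.map (fun p => (p.1, wlK p)))).getD i 0) l]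
    rw [sorted_rev_congr_key _ wlK l hgetD_pairs]
  have horden : ordenarValoresDicionario (PySem.Dict.mk (l.map (fun p => (p.1, wlK p))))
      = (PySem.List.sorted l wlK true).map (fun p => (p.1, wlK p)) := by
    unfold ordenarValoresDicionario
    rw [hsort, PySem.List.foldl_append_singleton_eq_map, List.nil_append, List.map_map]
    apply List.map_congr_left
    intro p hp
    have hpl : p ∈ l := by
      have := (PySem.List.mem_sorted l wlK true p).mp hp
      exact this
    simp [hgetD_pairs p hpl]
  have hfilter : ∀ (c : Int → Bool),
      (List.map (fun i => (i, (PySem.Dict.mk l).getD i []))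
          (List.filter c (List.map (fun x => x.1) l)))
        = l.filter (fun p => c p.1) := by
    intro c
    rw [List.filter_map, List.map_map]
    have : ∀ p ∈ l.filter (fun p => c p.1), ((p.1, (PySem.Dict.mk l).getD p.1 [])) = p := by
      intro p hp
      have hpl : p ∈ l := List.mem_of_mem_filter hp
      simp [hget p hpl]
    calc (List.filter (c ∘ fun p => p.1) l).map
          ((fun i => (i, (PySem.Dict.mk l).getD i [])) ∘ fun p => p.1)
        = (List.filter (c ∘ fun p => p.1) l).map (fun p => p) := by
          apply List.map_congr_left
          intro p hp
          have hpl : p ∈ l := List.mem_of_mem_filter hp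
          simp [Function.comp, hget p hpl]
      _ = l.filter (fun p => c p.1) := by
          rw [List.map_id']
          exact List.filter_congr (fun p _ => rfl)
  simp only [eletismo]
  rw [PySem.Dict.keys_mk]
  rw [hinfo, horden, hfilter]

-- ===== VERDICT (by name: the statement is the Claim_ definition above) =====
theorem eletismo_spec : Claim_equal_eletismo := by
  intro l N _ hpre
  obtain ⟨hne, hvals, hnd, hN⟩ := hpre
  show eletismo l N = eletismo_alt l N
  have hndl : l.Nodup := hnd.of_map
  have hσperm : (PySem.List.sorted l wlK true).Perm l := PySem.List.sorted_perm l wlK true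
  have hσlen : (PySem.List.sorted l wlK true).length = l.length := hσperm.length_eq
  have hσne : PySem.List.sorted l wlK true ≠ [] := by
    intro h
    exact hne ((PySem.List.sorted_eq_nil_iff l wlK true).mp h)
  have hσmeml : ∀ p ∈ PySem.List.sorted l wlK true, p ∈ l := by
    intro p hp
    exact (PySem.List.mem_sorted l wlK true p).mp hp
  have hσfst_nodup : ((PySem.List.sorted l wlK true).map (fun p => p.1)).Nodup :=
    ((hσperm.map (fun p => p.1)).nodup_iff).mpr hnd
  have hbest : PySem.List.maxD (l.map (fun p => (p.1, wlK p))) (fun p => p.2) (0, 0)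
      = PySem.List.pyGetD ((PySem.List.sorted l wlK true).map (fun p => (p.1, wlK p))) 0 (0, 0) := by
    obtain ⟨q, σ', hcons⟩ := List.exists_cons_of_ne_nil hσne
    have hmax : PySem.List.max? (l.map (fun p => (p.1, wlK p))) (fun p => p.2)
        = ((PySem.List.sorted l wlK true).map (fun p => (p.1, wlK p))).head? := by
      rw [max?_eq_head?_sorted_rev]
      exact congrArg List.head? (sorted_rev_map (fun p => (p.1, wlK p)) (fun p => p.2) l)
    simp only [PySem.List.maxD, hmax, hcons, List.map_cons, List.head?_cons, Option.getD_some,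
      PySem.List.pyGetD_zero_cons]
  rw [eletismo_normal l N hnd, quantidade_eq N]
  simp only [eletismo_alt, List.map_map, List.length_map]
  have hbest' : PySem.List.maxD (l.map ((fun t : Int × List Int × Int => (t.1, t.2.2)) ∘
      (fun p : Int × List Int => (p.1, p.2, PySem.List.pyGetD p.2 (-1) 0)))) (fun p => p.2) (0, 0)
      = PySem.List.pyGetD ((PySem.List.sorted l wlK true).map (fun p => (p.1, wlK p))) 0 (0, 0) :=
    hbest
  rw [hbest']
  have hk0 : 0 ≤ PySem.Int.floordiv N 2 + PySem.Int.mod (PySem.Int.floordiv N 2) 2 := by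
    rw [PySem.Int.floordiv_eq_ediv_of_pos (by norm_num : (0:Int) < 2),
        PySem.Int.mod_eq_emod_of_pos (by norm_num : (0:Int) < 2)]
    omega
  by_cases hk_le : PySem.Int.floordiv N 2 + PySem.Int.mod (PySem.Int.floordiv N 2) 2 ≤ 0
  · -- k = 0: nobody is selected
    rw [if_pos hk_le]
    have hkeq : PySem.Int.floordiv N 2 + PySem.Int.mod (PySem.Int.floordiv N 2) 2 = 0 :=
      le_antisymm hk_le hk0
    rw [hkeq]
    rw [PySem.List.slice_to _ (le_refl (0 : Int))]
    norm_num
    rfl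
  · rw [if_neg hk_le]
    by_cases hk_ge : (l.length : Int) ≤ PySem.Int.floordiv N 2 + PySem.Int.mod (PySem.Int.floordiv N 2) 2
    · -- k ≥ n: everybody is selected
      rw [if_pos hk_ge]
      rw [PySem.List.slice_to _ hk0]
      have hlen' : (List.map (fun p => (p.1, wlK p)) (PySem.List.sorted l wlK true)).length
          ≤ (PySem.Int.floordiv N 2 + PySem.Int.mod (PySem.Int.floordiv N 2) 2).toNat := by
        rw [List.length_map, hσlen]
        omega
      rw [List.take_of_length_le hlen', List.map_map]
      have hofl : PySem.Set.ofList ((PySem.List.sorted l wlK true).map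
            ((fun i : Int × Int => i.1) ∘ (fun p : Int × List Int => (p.1, wlK p))))
          = (PySem.List.sorted l wlK true).map
            ((fun i : Int × Int => i.1) ∘ (fun p : Int × List Int => (p.1, wlK p))) :=
        PySem.Set.ofList_eq_self_of_nodup ((PySem.List.sorted l wlK true).map
          ((fun i : Int × Int => i.1) ∘ (fun p : Int × List Int => (p.1, wlK p)))) hσfst_nodup
      rw [hofl]
      have hfilt : l.filter (fun p =>
          PySem.Set.contains ((PySem.List.sorted l wlK true).map
            ((fun i : Int × Int => i.1) ∘ (fun p : Int × List Int => (p.1, wlK p)))) p.1)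
          = l := by
        apply List.filter_eq_self.mpr
        intro p hp
        rw [PySem.Set.contains_iff]
        exact List.mem_map.mpr ⟨p, hσperm.mem_iff.mpr hp, rfl⟩
      rw [hfilt, items_ofList_of_nodup l hnd]
    · -- 0 < k < n: the interesting case
      rw [if_neg hk_ge]
      set K := PySem.Int.floordiv N 2 + PySem.Int.mod (PySem.Int.floordiv N 2) 2 with hKdef
      have hkpos : 0 < K := by omega
      set kk := K.toNat with hkkdef
      have hK : K = (kk : Int) := (Int.toNat_of_nonneg hk0).symm
      have hkkpos : 0 < kk := by omega
      have hkkn : kk < l.length := by omega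
      have hkkσ : kk - 1 < (PySem.List.sorted l wlK true).length := by rw [hσlen]; omega
      -- the sorted values are the wlK-image of the sorted players
      have hcomp1 : ((fun t : Int × List Int × Int => t.2.2) ∘
          fun p : Int × List Int => (p.1, p.2, PySem.List.pyGetD p.2 (-1) 0)) = wlK :=
        funext fun p => rfl
      rw [hcomp1, sorted_rev_map wlK (fun v => v) l]
      have hcomp2 : (PySem.List.sorted l (fun a => wlK a) true) = PySem.List.sorted l wlK true := rfl
      rw [hcomp2]
      -- the cut-off value
      have hidx1 : (K - 1).toNat = kk - 1 := by omega
      have hcorte : PySem.List.pyGetD ((PySem.List.sorted l wlK true).map wlK) (K - 1) 0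
          = wlK ((PySem.List.sorted l wlK true)[kk - 1]'hkkσ) := by
        rw [PySem.List.pyGetD_eq_getElem _ 0 (by omega)
          (by rw [List.length_map, hσlen]; omega)]
        simp only [hidx1, List.getElem_map]
      rw [hcorte]
      set tt := wlK ((PySem.List.sorted l wlK true)[kk - 1]'hkkσ) with htt
      -- B's count of players above the cut-off
      rw [List.filter_map, List.length_map, List.foldl_map]
      have hcompfilt : ((fun t : Int × List Int × Int => decide (tt < t.2.2)) ∘
          (fun p : Int × List Int => (p.1, p.2, PySem.List.pyGetD p.2 (-1) 0)))
          = fun p : Int × List Int => decide (tt < wlK p) := funext fun p => rfl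
      rw [hcompfilt]
      set g := (List.filter (fun p : Int × List Int => decide (tt < wlK p)) l).length with hgdef
      have hgcount : g = l.countP (fun p => decide (tt < wlK p)) := by
        rw [hgdef, List.countP_eq_length_filter]
      -- A's selected names are the first kk of the sorted players
      rw [PySem.List.slice_to _ hk0, ← hkkdef, ← List.map_take, List.map_map]
      have hnomes_nodup : (((PySem.List.sorted l wlK true).take kk).map
          ((fun i : Int × Int => i.1) ∘ (fun p : Int × List Int => (p.1, wlK p)))).Nodup := by
        have h1 : List.Sublist (((PySem.List.sorted l wlK true).take kk).map (fun p => p.1))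
            ((PySem.List.sorted l wlK true).map (fun p => p.1)) :=
          (List.take_sublist kk _).map _
        exact hσfst_nodup.sublist h1
      rw [PySem.Set.ofList_eq_self_of_nodup _ hnomes_nodup]
      -- order facts about the sorted players
      have hpw := sorted_rev_stable wlK l hndl
      have hpwb : (PySem.List.sorted l wlK true).Pairwise (fun a b =>
          (decide (wlK b < wlK a) ||
            (decide (wlK a = wlK b) && decide (l.idxOf a < l.idxOf b))) = true) := by
        refine hpw.imp ?_
        intro a b hab
        rcases hab with h | ⟨h1, h2⟩
        · simp [h]
        · simp only [Bool.or_eq_true, Bool.and_eq_true, decide_eq_true_eq]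
          exact Or.inr ⟨h1, h2⟩
      have hasym : ∀ a b : Int × List Int,
          (decide (wlK b < wlK a) || (decide (wlK a = wlK b) && decide (l.idxOf a < l.idxOf b))) = true →
          (decide (wlK a < wlK b) || (decide (wlK b = wlK a) && decide (l.idxOf b < l.idxOf a))) = false := by
        intro a b hab
        cases hba : (decide (wlK a < wlK b) || (decide (wlK b = wlK a) && decide (l.idxOf b < l.idxOf a)))
        · rfl
        · exfalso
          simp only [Bool.or_eq_true, Bool.and_eq_true, decide_eq_true_eq] at hab hba
          omega
      have hselc : ∀ p ∈ l, (p ∈ (PySem.List.sorted l wlK true).take kk ↔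
          l.countP (fun y => decide (wlK p < wlK y) ||
            (decide (wlK y = wlK p) && decide (l.idxOf y < l.idxOf p))) < kk) := by
        intro p hp
        rw [← hσperm.countP_eq]
        exact take_countP_mem
          (fun a b => decide (wlK b < wlK a) || (decide (wlK a = wlK b) && decide (l.idxOf a < l.idxOf b)))
          hasym _ kk p hpwb (hσperm.mem_iff.mpr hp)
      have hmono : ∀ i j, (hij : i ≤ j) → (hj : j < (PySem.List.sorted l wlK true).length) →
          wlK ((PySem.List.sorted l wlK true)[j]'hj)
            ≤ wlK ((PySem.List.sorted l wlK true)[i]'(by omega)) := by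
        intro i j hij hj
        rcases eq_or_lt_of_le hij with rfl | hlt
        · exact le_refl _
        · have := List.pairwise_iff_getElem.mp hpw i j (by omega) hj hlt
          rcases this with h | ⟨h1, _⟩
          · exact le_of_lt h
          · exact le_of_eq h1.symm
      -- everything in the first kk is ≥ tt; everything from position kk-1 on is ≤ tt
      have htle : ∀ i, (hi : i < kk) → tt ≤ wlK ((PySem.List.sorted l wlK true)[i]'(by rw [hσlen]; omega)) := by
        intro i hi
        rw [htt]
        exact hmono i (kk - 1) (by omega) hkkσ
      have htge : ∀ i, (hi : kk - 1 ≤ i) → (hl : i < (PySem.List.sorted l wlK true).length) →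
          wlK ((PySem.List.sorted l wlK true)[i]'hl) ≤ tt := by
        intro i hi hl2
        rw [htt]
        exact hmono (kk - 1) i hi hl2
      have hcount_ge : kk ≤ l.countP (fun p => decide (tt ≤ wlK p)) := by
        rw [← hσperm.countP_eq]
        have hsplit : (PySem.List.sorted l wlK true).countP (fun p => decide (tt ≤ wlK p))
            = ((PySem.List.sorted l wlK true).take kk).countP (fun p => decide (tt ≤ wlK p))
              + ((PySem.List.sorted l wlK true).drop kk).countP (fun p => decide (tt ≤ wlK p)) := by
          rw [← List.countP_append, List.take_append_drop]
        have htake : ((PySem.List.sorted l wlK true).take kk).countP (fun p => decide (tt ≤ wlK p))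
            = ((PySem.List.sorted l wlK true).take kk).length := by
          rw [List.countP_eq_length]
          intro a ha
          obtain ⟨i, hi, hieq⟩ := List.mem_iff_getElem.mp ha
          have hil : i < kk := by
            have := hi
            rw [List.length_take] at this
            omega
          rw [List.getElem_take] at hieq
          rw [← hieq]
          simp only [decide_eq_true_eq]
          exact htle i hil
        have hlentake : ((PySem.List.sorted l wlK true).take kk).length = kk := by
          rw [List.length_take, hσlen]
          omega
        omega
      have hglt : g < kk := by
        have hgσ : g = (PySem.List.sorted l wlK true).countP (fun p => decide (tt < wlK p)) := by
          rw [hgcount, ← hσperm.countP_eq]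
        have hsplit : (PySem.List.sorted l wlK true).countP (fun p => decide (tt < wlK p))
            = ((PySem.List.sorted l wlK true).take (kk - 1)).countP (fun p => decide (tt < wlK p))
              + ((PySem.List.sorted l wlK true).drop (kk - 1)).countP (fun p => decide (tt < wlK p)) := by
          rw [← List.countP_append, List.take_append_drop]
        have hdrop : ((PySem.List.sorted l wlK true).drop (kk - 1)).countP
            (fun p => decide (tt < wlK p)) = 0 := by
          rw [List.countP_eq_zero]
          intro a ha
          obtain ⟨i, hi, hieq⟩ := List.mem_iff_getElem.mp ha
          rw [List.getElem_drop] at hieq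
          have hlen2 : kk - 1 + i < (PySem.List.sorted l wlK true).length := by
            have := hi
            rw [List.length_drop] at this
            omega
          have := htge (kk - 1 + i) (by omega) hlen2
          rw [hieq] at this
          simp only [decide_eq_true_eq]
          omega
        have htakele := List.countP_le_length
          (p := fun p : Int × List Int => decide (tt < wlK p))
          (l := (PySem.List.sorted l wlK true).take (kk - 1))
        have hlentake : ((PySem.List.sorted l wlK true).take (kk - 1)).length ≤ kk - 1 := by
          rw [List.length_take]
          omega
        omega
      -- classification of the selected set
      have hH1 : ∀ p ∈ l, tt < wlK p →
          (fun p => decide (p ∈ (PySem.List.sorted l wlK true).take kk)) p = true := by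
        intro p hp htp
        simp only [decide_eq_true_eq]
        apply (hselc p hp).mpr
        have hle : l.countP (fun y => decide (wlK p < wlK y) ||
            (decide (wlK y = wlK p) && decide (l.idxOf y < l.idxOf p)))
            ≤ l.countP (fun p => decide (tt < wlK p)) := by
          apply List.countP_mono_left
          intro y _ hryp
          simp only [Bool.or_eq_true, Bool.and_eq_true, decide_eq_true_eq] at hryp ⊢
          rcases hryp with h | ⟨h1, _⟩ <;> omega
        omega
      have hH2 : ∀ p ∈ l, wlK p < tt →
          (fun p => decide (p ∈ (PySem.List.sorted l wlK true).take kk)) p = false := by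
        intro p hp htp
        simp only [decide_eq_false_iff_not]
        intro hmem
        have hlt := (hselc p hp).mp hmem
        have hge : l.countP (fun p => decide (tt ≤ wlK p))
            ≤ l.countP (fun y => decide (wlK p < wlK y) ||
              (decide (wlK y = wlK p) && decide (l.idxOf y < l.idxOf p))) := by
          apply List.countP_mono_left
          intro y _ h
          simp only [decide_eq_true_eq] at h
          simp only [Bool.or_eq_true, decide_eq_true_eq]
          left
          omega
        omega
      have hH3 : ∀ pre p suf, l = pre ++ p :: suf → wlK p = tt →
          ((fun p => decide (p ∈ (PySem.List.sorted l wlK true).take kk)) p = true ↔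
            pre.countP (fun q => wlK q == tt) < kk - g) := by
        intro pre p suf hl hpt
        have hpl : p ∈ l := by rw [hl]; simp
        simp only [decide_eq_true_eq]
        rw [hselc p hpl]
        have hcnt : l.countP (fun y => decide (wlK p < wlK y) ||
            (decide (wlK y = wlK p) && decide (l.idxOf y < l.idxOf p)))
            = g + pre.countP (fun q => wlK q == tt) := by
          have hsplit := countP_or_disjoint (fun y => decide (tt < wlK y))
            (fun y => decide (wlK y = tt) && decide (l.idxOf y < l.idxOf p)) l
            (by
              intro y _ ⟨h1, h2⟩
              simp only [decide_eq_true_eq, Bool.and_eq_true] at h1 h2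
              omega)
          have hcongr : l.countP (fun y => decide (wlK p < wlK y) ||
              (decide (wlK y = wlK p) && decide (l.idxOf y < l.idxOf p)))
              = l.countP (fun y => decide (tt < wlK y) ||
                (decide (wlK y = tt) && decide (l.idxOf y < l.idxOf p))) := by
            apply List.countP_congr
            intro y _
            simp only [hpt, Bool.or_eq_true, Bool.and_eq_true, decide_eq_true_eq]
          have hpreidx := countP_idx_prefix wlK tt pre suf p (hl ▸ hndl)
          rw [← hl] at hpreidx
          rw [hcongr, hsplit, hgcount]
          exact congrArg (fun z => List.countP (fun y => decide (tt < wlK y)) l + z) hpreidx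
        rw [hcnt]
        omega
      -- both sides: selected players in original order
      congr 1
      have hpred : ∀ p ∈ l, PySem.Set.contains (((PySem.List.sorted l wlK true).take kk).map
          ((fun i : Int × Int => i.1) ∘ (fun p : Int × List Int => (p.1, wlK p)))) p.1
          = decide (p ∈ (PySem.List.sorted l wlK true).take kk) := by
        intro p hp
        rw [Bool.eq_iff_iff, PySem.Set.contains_iff, decide_eq_true_iff]
        constructor
        · intro hmem
          obtain ⟨q, hq, hq1⟩ := List.mem_map.mp hmem
          have hql : q ∈ l := hσmeml q (List.mem_of_mem_take hq)
          have heq := List.inj_on_of_nodup_map hnd hql hp hq1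
          rwa [← heq]
        · intro hmem
          exact List.mem_map.mpr ⟨p, hmem, rfl⟩
      rw [List.filter_congr hpred]
      have hfid : ((l.filter (fun p => decide (p ∈ (PySem.List.sorted l wlK true).take kk))).map
          (fun p => p.1)).Nodup :=
        hnd.sublist (List.filter_sublist.map _)
      rw [items_ofList_of_nodup _ hfid]
      -- B's budget pass computes the same selection
      have hbinit : K - (g : Int) = ((kk - g : Nat) : Int)
          - min ((([] : List (Int × List Int)).countP (fun q => wlK q == tt) : Int))
            ((kk - g : Nat) : Int) := by
        simp only [List.countP_nil]
        push_cast [Nat.sub_add_cancel]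
        omega
      have hfold := budget_aux wlK tt (kk - g)
        (fun p => decide (p ∈ (PySem.List.sorted l wlK true).take kk)) l hH1 hH2 hH3
        l [] [] (K - (g : Int)) rfl hbinit
      rw [List.nil_append] at hfold
      exact hfold.symm
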